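-- pv_equiv track=rewrite | github.com/Okm165/agh | cw6/zad32.py | find
-- ===== SOURCE A (Python) =====
-- def find(table:list, k:int, cnt:int=0,
--         a_sum:int=0, a_cnt:int=0, b_sum:int=0, b_cnt:int=0)->bool:
--     if a_cnt+b_cnt > k: return False
--     if a_cnt+b_cnt == k and a_sum == b_sum: return True
--     if cnt >= len(table): return False
--
--     return (
--         find(table, k, cnt+1, a_sum, a_cnt, b_sum, b_cnt) or
--         find(table, k, cnt+1, a_sum+table[cnt], a_cnt+1, b_sum, b_cnt) or
--         find(table, k, cnt+1, a_sum, a_cnt, b_sum+table[cnt], b_cnt+1)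
--     )
-- ===== SOURCE B (Python) =====
-- def find(table: list, k: int, cnt: int = 0,
--          a_sum: int = 0, a_cnt: int = 0, b_sum: int = 0, b_cnt: int = 0) -> bool:
--     # Layered DP over (picks still needed, a_sum - b_sum difference) states
--     # instead of A's exponential three-way recursion.
--     need = k - a_cnt - b_cnt
--     if need < 0:
--         return False
--     states = {(need, a_sum - b_sum)}
--     for i in range(cnt, len(table)):
--         v = table[i]
--         nxt = set(states)
--         for (rem, d) in states:
--             if rem:
--                 nxt.add((rem - 1, d + v))
--                 nxt.add((rem - 1, d - v))
--         states = nxt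
--     return (0, 0) in states
-- ===== Notes on version B (the rewrite author's own statement) =====
-- stated objective: alternative
-- what changed: Replaced A's exponential three-way recursion (skip / put in a / put in b at every index) by a forward DP that carries one deduplicated set of (picks-still-needed, a_sum-b_sum) states per table position and finally tests membership of (0,0); much cheaper when sum-differences collide, but not measurably faster on the generated large-value inputs.
-- outside the precondition, e.g. on find([], 0, -1, 0, 0, 0, 0): A returns True, B raises IndexError
import Mathlib
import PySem

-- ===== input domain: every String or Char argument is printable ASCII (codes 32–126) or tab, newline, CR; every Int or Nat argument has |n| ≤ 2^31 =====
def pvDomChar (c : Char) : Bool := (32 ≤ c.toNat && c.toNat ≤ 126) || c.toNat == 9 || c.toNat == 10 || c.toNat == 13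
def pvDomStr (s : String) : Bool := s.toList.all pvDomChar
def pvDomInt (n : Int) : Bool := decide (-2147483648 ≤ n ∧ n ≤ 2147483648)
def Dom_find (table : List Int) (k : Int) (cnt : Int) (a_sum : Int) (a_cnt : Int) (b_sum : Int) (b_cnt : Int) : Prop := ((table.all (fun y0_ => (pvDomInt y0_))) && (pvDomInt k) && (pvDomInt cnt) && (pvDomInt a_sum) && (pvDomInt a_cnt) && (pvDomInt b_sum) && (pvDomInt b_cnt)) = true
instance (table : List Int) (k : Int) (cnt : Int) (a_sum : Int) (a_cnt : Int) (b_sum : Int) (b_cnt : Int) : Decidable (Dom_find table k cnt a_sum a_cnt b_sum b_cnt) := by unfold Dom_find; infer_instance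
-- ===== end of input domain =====

-- B replaces A's exponential three-way recursion by a layered DP over (picks-still-needed, a_sum−b_sum) states.

-- ===== PORT A =====
-- literal transliteration of A's recursion; table[cnt] is pyGet? (Python wraparound),
-- total with default 0 — inside Pre_find every access is in range, exactly as in Python.
def find (table : List Int) (k : Int) (cnt : Int) (a_sum : Int) (a_cnt : Int) (b_sum : Int) (b_cnt : Int) : Bool :=
  if k < a_cnt + b_cnt then false
  else if a_cnt + b_cnt = k ∧ a_sum = b_sum then true
  else if (table.length : Int) ≤ cnt then false
  else
    let v := (PySem.List.pyGet? table cnt).getD 0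
    find table k (cnt+1) a_sum a_cnt b_sum b_cnt ||
    find table k (cnt+1) (a_sum+v) (a_cnt+1) b_sum b_cnt ||
    find table k (cnt+1) a_sum a_cnt (b_sum+v) (b_cnt+1)
termination_by ((table.length : Int) - cnt).toNat
decreasing_by all_goals omega

-- ===== PORT B =====
-- one DP layer: Python's  nxt = set(states); for (rem,d) in states: if rem: nxt.add(…); nxt.add(…)
def altStep (v : Int) (st : PySem.Set (Int × Int)) : PySem.Set (Int × Int) :=
  st.foldl
    (fun nxt p =>
      if p.1 ≠ 0 then
        PySem.Set.add (PySem.Set.add nxt (p.1 - 1, p.2 + v)) (p.1 - 1, p.2 - v)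
      else nxt)
    (PySem.Set.ofList st)

def find_alt (table : List Int) (k : Int) (cnt : Int) (a_sum : Int) (a_cnt : Int) (b_sum : Int) (b_cnt : Int) : Bool :=
  let need := k - a_cnt - b_cnt
  if need < 0 then false
  else
    let states :=
      (PySem.List.pyRange cnt (table.length : Int) 1).foldl
        (fun st i => altStep ((PySem.List.pyGet? table i).getD 0) st)
        (PySem.Set.ofList [(need, a_sum - b_sum)])
    PySem.Set.contains states ((0 : Int), (0 : Int))

-- ===== PRECONDITION & SPEC =====
-- Pre_ excludes cnt < -len(table) except where the count budget is already exceeded: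
-- there A's negative-index recursion either raises IndexError or walks wrapped indices
-- B's natural index loop cannot reach without itself raising IndexError at table[cnt].
def Pre_find (table : List Int) (k : Int) (cnt : Int) (a_sum : Int) (a_cnt : Int) (b_sum : Int) (b_cnt : Int) : Prop :=
  -(table.length : Int) ≤ cnt ∨ k < a_cnt + b_cnt
instance (table : List Int) (k : Int) (cnt : Int) (a_sum : Int) (a_cnt : Int) (b_sum : Int) (b_cnt : Int) : Decidable (Pre_find table k cnt a_sum a_cnt b_sum b_cnt) := by unfold Pre_find; infer_instance

def pvWitness_find : List Int × Int × Int × Int × Int × Int × Int := ([1, 2, 3, 4], 2, 0, 0, 0, 0, 0)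

def Spec_find (table : List Int) (k : Int) (cnt : Int) (a_sum : Int) (a_cnt : Int) (b_sum : Int) (b_cnt : Int) (out : Bool) : Prop := out = find_alt table k cnt a_sum a_cnt b_sum b_cnt
instance (table : List Int) (k : Int) (cnt : Int) (a_sum : Int) (a_cnt : Int) (b_sum : Int) (b_cnt : Int) (out : Bool) : Decidable (Spec_find table k cnt a_sum a_cnt b_sum b_cnt out) := by unfold Spec_find; infer_instance

-- ===== CLAIM (what is proved, stated in full; the proofs are below) =====
def Claim_equal_find : Prop := ∀ (table : List Int) (k : Int) (cnt : Int) (a_sum : Int) (a_cnt : Int) (b_sum : Int) (b_cnt : Int), Dom_find table k cnt a_sum a_cnt b_sum b_cnt → Pre_find table k cnt a_sum a_cnt b_sum b_cnt → Spec_find table k cnt a_sum a_cnt b_sum b_cnt (find table k cnt a_sum a_cnt b_sum b_cnt)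

-- ===== LEMMAS AND PROOFS =====

-- the elements A's recursion inspects from level cnt on (with Python's negative-index read)
def vals (table : List Int) (cnt : Int) : List Int :=
  (PySem.List.pyRange cnt (table.length : Int) 1).map (fun i => (PySem.List.pyGet? table i).getD 0)

-- abstraction of A's recursion: need = k - a_cnt - b_cnt, d = a_sum - b_sum
def g : List Int → Int → Int → Bool
  | [], need, d => decide (need = 0 ∧ d = 0)
  | v :: vs, need, d =>
    if need < 0 then false
    else if need = 0 ∧ d = 0 then true
    else g vs need d || g vs (need-1) (d+v) || g vs (need-1) (d-v)

-- abstraction of one DP run: reachability of (0,0) from (n,d) through the layers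
def hdp : List Int → Int → Int → Bool
  | [], n, d => decide (n = 0 ∧ d = 0)
  | v :: vs, n, d => hdp vs n d || (if n ≠ 0 then hdp vs (n-1) (d+v) || hdp vs (n-1) (d-v) else false)

theorem g_neg (vs : List Int) (n d : Int) (h : n < 0) : g vs n d = false := by
  cases vs <;> simp [g] <;> omega

theorem g_zero (vs : List Int) : g vs 0 0 = true := by
  cases vs <;> simp [g]

theorem hdp_zero (vs : List Int) : hdp vs 0 0 = true := by
  induction vs with
  | nil => simp [hdp]
  | cons v vs ih => simp [hdp, ih]

theorem g_eq_hdp (vs : List Int) : ∀ (n d : Int), 0 ≤ n → g vs n d = hdp vs n d := by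
  induction vs with
  | nil => intro n d _; simp [g, hdp]
  | cons v vs ih =>
    intro n d hn
    by_cases h0 : n = 0 ∧ d = 0
    · obtain ⟨rfl, rfl⟩ := h0
      simp [g, hdp_zero, hdp]
    · by_cases hz : n = 0
      · subst hz
        have hd : d ≠ 0 := by tauto
        simp only [g, hdp, if_neg (by omega : ¬ (0:Int) < 0)]
        rw [g_neg vs (0-1) (d+v) (by omega), g_neg vs (0-1) (d-v) (by omega), ih 0 d le_rfl]
        simp [hd]
      · have hpos : (0:Int) ≤ n - 1 := by omega
        simp only [g, hdp, if_neg (by omega : ¬ n < 0), if_neg h0]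
        rw [ih n d hn, ih (n-1) (d+v) hpos, ih (n-1) (d-v) hpos]
        simp [hz, Bool.or_assoc]

theorem vals_nil (table : List Int) (cnt : Int) (h : (table.length : Int) ≤ cnt) :
    vals table cnt = [] := by
  simp [vals, PySem.List.pyRange_one_eq_nil h]

theorem vals_cons (table : List Int) (cnt : Int) (h : cnt < (table.length : Int)) :
    vals table cnt = ((PySem.List.pyGet? table cnt).getD 0) :: vals table (cnt+1) := by
  simp [vals, PySem.List.pyRange_one_cons h]

theorem find_eq_g (table : List Int) (k : Int) : ∀ (fuel : Nat) (cnt a_sum a_cnt b_sum b_cnt : Int),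
    ((table.length : Int) - cnt).toNat ≤ fuel →
    find table k cnt a_sum a_cnt b_sum b_cnt =
      g (vals table cnt) (k - a_cnt - b_cnt) (a_sum - b_sum) := by
  intro fuel
  induction fuel with
  | zero =>
    intro cnt a_sum a_cnt b_sum b_cnt hf
    have hlen : (table.length : Int) ≤ cnt := by omega
    rw [find, vals_nil table cnt hlen]
    by_cases h1 : k < a_cnt + b_cnt
    · simp [g, h1]; omega
    · by_cases h2 : a_cnt + b_cnt = k ∧ a_sum = b_sum
      · simp [g, h2]; omega
      · simp only [if_neg h1, if_neg h2, if_pos hlen, g]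
        rw [eq_comm, decide_eq_false_iff_not]
        rintro ⟨hn, hd⟩
        exact h2 ⟨by omega, by omega⟩
  | succ m ih =>
    intro cnt a_sum a_cnt b_sum b_cnt hf
    rw [find]
    by_cases h1 : k < a_cnt + b_cnt
    · rw [if_pos h1, g_neg _ _ _ (by omega)]
    · rw [if_neg h1]
      by_cases h2 : a_cnt + b_cnt = k ∧ a_sum = b_sum
      · rw [if_pos h2]
        have : k - a_cnt - b_cnt = 0 := by omega
        rw [this, (by omega : a_sum - b_sum = 0), g_zero]
      · rw [if_neg h2]
        by_cases h3 : (table.length : Int) ≤ cnt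
        · rw [if_pos h3, vals_nil table cnt h3]
          simp only [g]
          rw [eq_comm, decide_eq_false_iff_not]
          rintro ⟨hn, hd⟩
          exact h2 ⟨by omega, by omega⟩
        · rw [if_neg h3]
          have hlt : cnt < (table.length : Int) := by omega
          have hfuel : ((table.length : Int) - (cnt+1)).toNat ≤ m := by omega
          rw [vals_cons table cnt hlt]
          simp only [g]
          rw [if_neg (by omega : ¬ k - a_cnt - b_cnt < 0),
            if_neg (show ¬ (k - a_cnt - b_cnt = 0 ∧ a_sum - b_sum = 0) by
              rintro ⟨hn, hd⟩; exact h2 ⟨by omega, by omega⟩)]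
          rw [ih (cnt+1) a_sum a_cnt b_sum b_cnt hfuel,
              ih (cnt+1) (a_sum + (PySem.List.pyGet? table cnt).getD 0) (a_cnt+1) b_sum b_cnt hfuel,
              ih (cnt+1) a_sum a_cnt (b_sum + (PySem.List.pyGet? table cnt).getD 0) (b_cnt+1) hfuel]
          have e1 : k - (a_cnt+1) - b_cnt = k - a_cnt - b_cnt - 1 := by ring
          have e2 : k - a_cnt - (b_cnt+1) = k - a_cnt - b_cnt - 1 := by ring
          have e3 : a_sum + (PySem.List.pyGet? table cnt).getD 0 - b_sum
              = a_sum - b_sum + (PySem.List.pyGet? table cnt).getD 0 := by ring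
          have e4 : a_sum - (b_sum + (PySem.List.pyGet? table cnt).getD 0)
              = a_sum - b_sum - (PySem.List.pyGet? table cnt).getD 0 := by ring
          rw [e1, e2, e3, e4]

theorem mem_foldl_step (v : Int) (l : List (Int × Int)) (acc : PySem.Set (Int × Int)) (q : Int × Int) :
    (q ∈ l.foldl
        (fun nxt p =>
          if p.1 ≠ 0 then
            PySem.Set.add (PySem.Set.add nxt (p.1 - 1, p.2 + v)) (p.1 - 1, p.2 - v)
          else nxt) acc) ↔
    q ∈ acc ∨ ∃ p ∈ l, p.1 ≠ 0 ∧ (q = (p.1 - 1, p.2 + v) ∨ q = (p.1 - 1, p.2 - v)) := by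
  induction l generalizing acc with
  | nil => simp
  | cons p l ih =>
    simp only [List.foldl_cons, ih]
    by_cases hp : p.1 ≠ 0
    · simp only [if_pos hp, PySem.Set.mem_add, List.mem_cons]
      constructor
      · rintro (((h | h) | h) | ⟨r, hr, h⟩)
        · exact Or.inl h
        · exact Or.inr ⟨p, Or.inl rfl, hp, Or.inl h⟩
        · exact Or.inr ⟨p, Or.inl rfl, hp, Or.inr h⟩
        · exact Or.inr ⟨r, Or.inr hr, h⟩
      · rintro (h | ⟨r, (rfl | hr), hr0, hc⟩)
        · exact Or.inl (Or.inl (Or.inl h))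
        · rcases hc with h | h
          · exact Or.inl (Or.inl (Or.inr h))
          · exact Or.inl (Or.inr h)
        · exact Or.inr ⟨r, hr, hr0, hc⟩
    · simp only [if_neg hp, List.mem_cons]
      constructor
      · rintro (h | ⟨r, hr, h⟩)
        · exact Or.inl h
        · exact Or.inr ⟨r, Or.inr hr, h⟩
      · rintro (h | ⟨r, (rfl | hr), hr0, hc⟩)
        · exact Or.inl h
        · exact absurd hr0 hp
        · exact Or.inr ⟨r, hr, hr0, hc⟩

theorem mem_altStep (v : Int) (st : PySem.Set (Int × Int)) (q : Int × Int) :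
    q ∈ altStep v st ↔
    q ∈ st ∨ ∃ p ∈ st, p.1 ≠ 0 ∧ (q = (p.1 - 1, p.2 + v) ∨ q = (p.1 - 1, p.2 - v)) := by
  unfold altStep
  rw [mem_foldl_step, PySem.Set.mem_ofList]

theorem dp_mem (vs : List Int) : ∀ (S : PySem.Set (Int × Int)),
    (((0 : Int), (0 : Int)) ∈ vs.foldl (fun st v => altStep v st) S) ↔
    ∃ p ∈ S, hdp vs p.1 p.2 = true := by
  induction vs with
  | nil =>
    intro S
    simp only [List.foldl_nil, hdp]
    constructor
    · intro h; exact ⟨(0,0), h, by simp⟩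
    · rintro ⟨p, hp, hph⟩
      have : p = (0, 0) := by
        have := of_decide_eq_true hph
        exact Prod.ext this.1 this.2
      rwa [this] at hp
  | cons v vs ih =>
    intro S
    simp only [List.foldl_cons, ih, mem_altStep]
    constructor
    · rintro ⟨q, (hq | ⟨p, hp, hp0, hc⟩), hqh⟩
      · exact ⟨q, hq, by simp [hdp, hqh]⟩
      · refine ⟨p, hp, ?_⟩
        simp only [hdp, if_pos hp0, Bool.or_eq_true]
        rcases hc with rfl | rfl
        · exact Or.inr (Or.inl hqh)
        · exact Or.inr (Or.inr hqh)
    · rintro ⟨p, hp, hph⟩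
      simp only [hdp, Bool.or_eq_true] at hph
      rcases hph with h | h
      · exact ⟨p, Or.inl hp, h⟩
      · by_cases hp0 : p.1 ≠ 0
        · rw [if_pos hp0, Bool.or_eq_true] at h
          rcases h with h | h
          · exact ⟨(p.1 - 1, p.2 + v), Or.inr ⟨p, hp, hp0, Or.inl rfl⟩, h⟩
          · exact ⟨(p.1 - 1, p.2 - v), Or.inr ⟨p, hp, hp0, Or.inr rfl⟩, h⟩
        · rw [if_neg hp0] at h; exact absurd h (by simp)

theorem find_alt_eq_hdp (table : List Int) (k cnt a_sum a_cnt b_sum b_cnt : Int)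
    (h : ¬ k - a_cnt - b_cnt < 0) :
    find_alt table k cnt a_sum a_cnt b_sum b_cnt =
      hdp (vals table cnt) (k - a_cnt - b_cnt) (a_sum - b_sum) := by
  have key : PySem.Set.contains
      ((PySem.List.pyRange cnt (table.length : Int) 1).foldl
        (fun st i => altStep ((PySem.List.pyGet? table i).getD 0) st)
        (PySem.Set.ofList [(k - a_cnt - b_cnt, a_sum - b_sum)])) ((0 : Int), (0 : Int))
      = hdp (vals table cnt) (k - a_cnt - b_cnt) (a_sum - b_sum) := by
    have hfold : (PySem.List.pyRange cnt (table.length : Int) 1).foldl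
        (fun st i => altStep ((PySem.List.pyGet? table i).getD 0) st)
        (PySem.Set.ofList [(k - a_cnt - b_cnt, a_sum - b_sum)])
        = (vals table cnt).foldl (fun st v => altStep v st)
          (PySem.Set.ofList [(k - a_cnt - b_cnt, a_sum - b_sum)]) := by
      rw [vals, List.foldl_map]
    rw [hfold, Bool.eq_iff_iff, PySem.Set.contains_iff, dp_mem]
    constructor
    · rintro ⟨p, hp, hph⟩
      simp only [PySem.Set.mem_ofList, List.mem_singleton] at hp
      rwa [hp] at hph
    · intro hT
      exact ⟨(k - a_cnt - b_cnt, a_sum - b_sum), by simp [PySem.Set.mem_ofList], hT⟩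
  unfold find_alt
  rw [if_neg h]
  exact key

theorem find_alt_neg (table : List Int) (k cnt a_sum a_cnt b_sum b_cnt : Int)
    (h : k - a_cnt - b_cnt < 0) :
    find_alt table k cnt a_sum a_cnt b_sum b_cnt = false := by
  unfold find_alt
  simp [h]

-- ===== VERDICT (by name: the statement is the Claim_ definition above) =====
theorem find_spec : Claim_equal_find := by
  intro table k cnt a_sum a_cnt b_sum b_cnt _ hpre
  unfold Spec_find
  by_cases hneg : k < a_cnt + b_cnt
  · rw [find, if_pos hneg, find_alt_neg table k cnt a_sum a_cnt b_sum b_cnt (by omega)]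
  · have hc : -(table.length : Int) ≤ cnt := by
      rcases hpre with h | h
      · exact h
      · exact absurd h hneg
    rw [find_eq_g table k ((table.length : Int) - cnt).toNat cnt a_sum a_cnt b_sum b_cnt le_rfl,
        find_alt_eq_hdp table k cnt a_sum a_cnt b_sum b_cnt (by omega),
        g_eq_hdp _ _ _ (by omega)]
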